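-- pv_equiv track=rewrite | github.com/jungpark-mlir/triton | third_party/amd/python/examples/gluon/f16_gemm_warp_pipeline_gfx1250.py | _compute_tdm_warp_bases
-- ===== SOURCE A (Python) =====
-- def _compute_tdm_warp_bases(block_shape, num_warps, active_warps):
--     """Compute warp_bases for TDM specialization with the given active warp count.
--
--     Returns a tuple of tuples suitable for passing as a constexpr.
--     """
--     import math
--     assert active_warps < num_warps
--
--     ndim = len(block_shape)
--     num_bits = int(math.log2(num_warps))
--
--     warps_per_dim = [1] * ndim
--     remaining = active_warps
--     for d in range(ndim):
--         while remaining > 1 and warps_per_dim[d] * 2 <= block_shape[d]: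
--             warps_per_dim[d] *= 2
--             remaining //= 2
--     if remaining > 1:
--         warps_per_dim[-1] *= remaining
--
--     bases = []
--     for d in range(ndim):
--         per_warp_tile = block_shape[d] // warps_per_dim[d]
--         for k in range(int(math.log2(warps_per_dim[d]))):
--             basis = [0] * ndim
--             basis[d] = per_warp_tile * (1 << k)
--             bases.append(tuple(basis))
--
--     while len(bases) < num_bits:
--         bases.append(tuple([0] * ndim))
--
--     return tuple(bases)
-- ===== SOURCE B (Python) =====
-- def _compute_tdm_warp_bases(block_shape, num_warps, active_warps):
--     """Same result as the greedy-doubling version, via bit-length arithmetic."""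
--     assert active_warps < num_warps
--
--     ndim = len(block_shape)
--     num_bits = num_warps.bit_length() - 1
--
--     # per-dimension exponents: spend the bit budget of active_warps greedily
--     budget = active_warps.bit_length() - 1 if active_warps > 1 else 0
--     exps = []
--     for s in block_shape:
--         cap = s.bit_length() - 1 if s >= 2 else 0
--         e = min(budget, cap)
--         budget -= e
--         exps.append(e)
--
--     wpd = [1 << e for e in exps]
--     leftover = active_warps // (1 << sum(exps))
--     if leftover > 1:
--         wpd[-1] *= leftover
--
--     rows = [
--         tuple((block_shape[d] // wpd[d]) * (1 << k) if i == d else 0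
--               for i in range(ndim))
--         for d in range(ndim)
--         for k in range(wpd[d].bit_length() - 1)
--     ]
--     rows += [(0,) * ndim] * (num_bits - len(rows))
--     return tuple(rows)
-- ===== Notes on version B (the rewrite author's own statement) =====
-- stated objective: alternative
-- what changed: Replaces A's greedy doubling while-loops (halving 'remaining' step by step while mutating warps_per_dim in place) by direct bit-length/exponent arithmetic on an integer bit budget, and builds the rows with comprehensions plus arithmetic padding instead of append loops and a trailing while-pad loop.
import Mathlib
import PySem

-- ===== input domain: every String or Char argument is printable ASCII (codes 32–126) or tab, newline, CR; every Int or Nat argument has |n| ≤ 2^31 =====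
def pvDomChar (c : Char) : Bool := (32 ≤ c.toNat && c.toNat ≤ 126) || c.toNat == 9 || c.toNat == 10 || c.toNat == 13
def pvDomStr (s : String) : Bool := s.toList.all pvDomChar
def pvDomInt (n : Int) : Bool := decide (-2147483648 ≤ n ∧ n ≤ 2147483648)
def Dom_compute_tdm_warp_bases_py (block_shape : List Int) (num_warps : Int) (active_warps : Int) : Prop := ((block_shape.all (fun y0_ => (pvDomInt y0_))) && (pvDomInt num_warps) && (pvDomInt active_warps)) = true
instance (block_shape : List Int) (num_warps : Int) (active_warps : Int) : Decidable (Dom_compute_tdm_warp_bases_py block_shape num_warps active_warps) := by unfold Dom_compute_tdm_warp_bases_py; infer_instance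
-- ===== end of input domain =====

-- B replaces A's greedy doubling while-loops with bit-length (exponent) arithmetic and
-- comprehension-style construction of the rows; same return value on all of Pre_ (objective: alternative).

-- ===== PORT A =====

/-- port of `int(math.log2(n))` — exact for the positive integers this function applies it to -/
def pvFloorLog2 (n : Int) : Nat := Nat.log 2 n.toNat

/-- the inner `while remaining > 1 and warps_per_dim[d] * 2 <= block_shape[d]` loop of A;
    state is (warps_per_dim[d], remaining) -/
def pvInnerA (bsd wpd remaining : Int) : Int × Int :=
  if h : 1 < remaining ∧ wpd * 2 ≤ bsd then
    pvInnerA bsd (wpd * 2) (PySem.Int.floordiv remaining 2)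
  else (wpd, remaining)
termination_by remaining.toNat
decreasing_by
  rw [PySem.Int.floordiv_eq_ediv_of_pos (by omega : (0:Int) < 2)]
  omega

/-- one iteration of A's `for d in range(ndim)` loop -/
def pvStepA (block_shape : List Int) (st : List Int × Int) (d : Int) : List Int × Int :=
  let r := pvInnerA (PySem.List.pyGetD block_shape d 0) (PySem.List.pyGetD st.1 d 0) st.2
  (PySem.List.pySetD st.1 d r.1, r.2)

/-- A's trailing `while len(bases) < num_bits: bases.append((0,)*ndim)` loop -/
def pvPadA (ndim num_bits : Nat) (bases : List (List Int)) : List (List Int) :=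
  if bases.length < num_bits then pvPadA ndim num_bits (bases ++ [List.replicate ndim 0]) else bases
termination_by num_bits - bases.length

def compute_tdm_warp_bases_py (block_shape : List Int) (num_warps : Int) (active_warps : Int) : List (List Int) :=
  let ndim := block_shape.length
  let num_bits := pvFloorLog2 num_warps
  let st := (PySem.List.pyRange 0 (ndim : Int)).foldl (pvStepA block_shape)
              (List.replicate ndim 1, active_warps)
  let warps := if 1 < st.2 then
      PySem.List.pySetD st.1 (-1) (PySem.List.pyGetD st.1 (-1) 0 * st.2)
    else st.1
  let bases := (PySem.List.pyRange 0 (ndim : Int)).foldl (fun bases d =>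
      let per := PySem.Int.floordiv (PySem.List.pyGetD block_shape d 0) (PySem.List.pyGetD warps d 0)
      (PySem.List.pyRange 0 (pvFloorLog2 (PySem.List.pyGetD warps d 0) : Int)).foldl
        (fun acc k => acc ++ [PySem.List.pySetD (List.replicate ndim (0:Int)) d (per * 2 ^ k.toNat)]) bases)
    []
  pvPadA ndim num_bits bases

-- ===== PORT B =====

/-- one iteration of B's exponent-budget loop: state is (budget, exps) -/
def pvStepB (st : Nat × List Nat) (s : Int) : Nat × List Nat :=
  let cap := if 2 ≤ s then PySem.Int.bitLength s - 1 else 0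
  let e := min st.1 cap
  (st.1 - e, st.2 ++ [e])

def compute_tdm_warp_bases_py_alt (block_shape : List Int) (num_warps : Int) (active_warps : Int) : List (List Int) :=
  let ndim := block_shape.length
  let num_bits := PySem.Int.bitLength num_warps - 1
  let budget := if 1 < active_warps then PySem.Int.bitLength active_warps - 1 else 0
  let exps := (block_shape.foldl pvStepB (budget, [])).2
  let wpd : List Int := exps.map (fun e => (2:Int) ^ e)
  let leftover := PySem.Int.floordiv active_warps (2 ^ exps.sum)
  let wpd := if 1 < leftover then
      PySem.List.pySetD wpd (-1) (PySem.List.pyGetD wpd (-1) 0 * leftover)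
    else wpd
  let rows := (List.range ndim).flatMap (fun (d : Nat) =>
      (List.range (PySem.Int.bitLength (PySem.List.pyGetD wpd (d : Int) 0) - 1)).map (fun k =>
        (List.range ndim).map (fun i =>
          if i = d then
            PySem.Int.floordiv (PySem.List.pyGetD block_shape (d : Int) 0) (PySem.List.pyGetD wpd (d : Int) 0) * 2 ^ k
          else 0)))
  rows ++ List.replicate (num_bits - rows.length) (List.replicate ndim 0)

-- ===== PRECONDITION & SPEC =====
-- Pre_ excludes exactly the inputs where the Python A raises: the assert (active_warps < num_warps),
-- math.log2 of a non-positive num_warps (ValueError), and warps_per_dim[-1] on an empty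
-- block_shape when active_warps > 1 (IndexError).
def Pre_compute_tdm_warp_bases_py (block_shape : List Int) (num_warps : Int) (active_warps : Int) : Prop :=
  active_warps < num_warps ∧ 1 ≤ num_warps ∧ (block_shape = [] → active_warps ≤ 1)
instance (block_shape : List Int) (num_warps : Int) (active_warps : Int) : Decidable (Pre_compute_tdm_warp_bases_py block_shape num_warps active_warps) := by unfold Pre_compute_tdm_warp_bases_py; infer_instance

def pvWitness_compute_tdm_warp_bases_py : List Int × Int × Int := ([4, 4], 8, 4)

def Spec_compute_tdm_warp_bases_py (block_shape : List Int) (num_warps : Int) (active_warps : Int) (out : List (List Int)) : Prop := out = compute_tdm_warp_bases_py_alt block_shape num_warps active_warps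
instance (block_shape : List Int) (num_warps : Int) (active_warps : Int) (out : List (List Int)) : Decidable (Spec_compute_tdm_warp_bases_py block_shape num_warps active_warps out) := by unfold Spec_compute_tdm_warp_bases_py; infer_instance

-- ===== CLAIM (what is proved, stated in full; the proofs are below) =====
def Claim_equal_compute_tdm_warp_bases_py : Prop := ∀ (block_shape : List Int) (num_warps : Int) (active_warps : Int), Dom_compute_tdm_warp_bases_py block_shape num_warps active_warps → Pre_compute_tdm_warp_bases_py block_shape num_warps active_warps → Spec_compute_tdm_warp_bases_py block_shape num_warps active_warps (compute_tdm_warp_bases_py block_shape num_warps active_warps)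

-- ===== LEMMAS AND PROOFS =====

def pvCap (s : Int) : Nat := if 2 ≤ s then Nat.log 2 s.toNat else 0
def pvAvail (r : Int) : Nat := if 1 < r then Nat.log 2 r.toNat else 0

theorem pvFloordiv_one (a : Int) : PySem.Int.floordiv a 1 = a := by
  rw [PySem.Int.floordiv_eq_ediv_of_pos (by norm_num)]; exact Int.ediv_one a

theorem pvFloordiv_pow_add (a : Int) (k e : Nat) :
    PySem.Int.floordiv (PySem.Int.floordiv a (2 ^ k)) (2 ^ e) = PySem.Int.floordiv a (2 ^ (k + e)) := by
  rw [PySem.Int.floordiv_eq_ediv_of_pos (by positivity), PySem.Int.floordiv_eq_ediv_of_pos (by positivity),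
      PySem.Int.floordiv_eq_ediv_of_pos (by positivity), Int.ediv_ediv_of_nonneg (by positivity),
      pow_add]

theorem pvIntPowLe (j : Nat) (s : Int) : (2:Int) ^ j ≤ s ↔ 2 ^ j ≤ s.toNat := by
  rw [show ((2:Int) ^ j) = ((2 ^ j : Nat) : Int) by push_cast; ring]
  have h0 : 0 < 2 ^ j := Nat.two_pow_pos j
  omega

theorem pvCap_iff (s : Int) (j : Nat) : 2 ^ (j + 1) ≤ s ↔ j + 1 ≤ pvCap s := by
  unfold pvCap
  split
  · next hs =>
    rw [Nat.le_log_iff_pow_le (by norm_num) (by omega : s.toNat ≠ 0), pvIntPowLe]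
  · next hs =>
    have h2 : (2:Int) ≤ 2 ^ (j + 1) := by
      calc (2:Int) = 2 ^ 1 := by ring
      _ ≤ 2 ^ (j + 1) := by exact pow_le_pow_right₀ (by norm_num) (by omega)
    constructor
    · intro h; omega
    · intro h; omega

theorem pvAvail_pos_iff (r : Int) : 1 < r ↔ 1 ≤ pvAvail r := by
  unfold pvAvail
  split
  · next h => exact ⟨fun _ => Nat.log_pos (by norm_num) (by omega), fun _ => h⟩
  · next h => constructor <;> intro <;> omega

theorem pvBitLength_eq_log_nat (m : Nat) (h : 0 < m) :
    PySem.Int.bitLength (m : Int) = Nat.log 2 m + 1 := by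
  induction m using Nat.strong_induction_on with
  | _ m ih =>
    rcases Nat.lt_or_ge m 2 with h2 | h2
    · have : m = 1 := by omega
      subst this; decide
    · rw [PySem.Int.bitLength_natCast (by omega), ih (m / 2) (by omega) (by omega)]
      have hd := Nat.log_div_base 2 m
      have hp : 0 < Nat.log 2 m := Nat.log_pos (by norm_num) (by omega)
      omega

theorem pvBitLength_eq_log (n : Int) (h : 1 ≤ n) :
    PySem.Int.bitLength n - 1 = Nat.log 2 n.toNat := by
  obtain ⟨m, rfl⟩ : ∃ m : Nat, n = (m : Int) := ⟨n.toNat, by omega⟩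
  rw [pvBitLength_eq_log_nat m (by omega)]
  simp

theorem pvAvail_floordiv_two (r : Int) (h : 1 < r) :
    pvAvail (PySem.Int.floordiv r 2) = pvAvail r - 1 := by
  rw [PySem.Int.floordiv_eq_ediv_of_pos (by norm_num)]
  have hr : (r / 2).toNat = r.toNat / 2 := by omega
  unfold pvAvail
  rcases Nat.lt_or_ge r.toNat 4 with h4 | h4
  · have : r.toNat = 2 ∨ r.toNat = 3 := by omega
    have hr2 : ¬ (1 < r / 2) := by omega
    rcases this with h' | h' <;> simp [hr2, h, h'] <;> decide
  · have hr2 : 1 < r / 2 := by omega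
    have hd := Nat.log_div_base 2 r.toNat
    have hp : 0 < Nat.log 2 r.toNat := Nat.log_pos (by norm_num) (by omega)
    simp only [hr2, h, if_true]
    rw [hr]
    omega

theorem pvAvail_floordiv_pow (aw : Int) (k : Nat) (hk : k ≤ pvAvail aw) :
    pvAvail (PySem.Int.floordiv aw (2 ^ k)) = pvAvail aw - k := by
  induction k with
  | zero => rw [pow_zero, pvFloordiv_one]; omega
  | succ k ih =>
    have hk' : k ≤ pvAvail aw := by omega
    have h1 : 1 < PySem.Int.floordiv aw (2 ^ k) := by
      rw [pvAvail_pos_iff, ih hk']; omega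
    rw [← pvFloordiv_pow_add aw k 1, pow_one, pvAvail_floordiv_two _ h1, ih hk']
    omega

def pvSpecExps : Nat → List Int → List Nat
  | _, [] => []
  | b, s :: t => min b (pvCap s) :: pvSpecExps (b - min b (pvCap s)) t

theorem pvInnerA_char (s : Int) :
    ∀ (N : Nat) (r : Int) (j : Nat), r.toNat ≤ N →
      pvInnerA s (2 ^ j) r =
        (2 ^ (j + min (pvAvail r) (pvCap s - j)),
         PySem.Int.floordiv r (2 ^ (min (pvAvail r) (pvCap s - j)))) := by
  intro N
  induction N with
  | zero =>
    intro r j hr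
    have h1 : ¬ 1 < r := by omega
    rw [pvInnerA, dif_neg (by tauto : ¬ (1 < r ∧ 2 ^ j * 2 ≤ s))]
    have ha : pvAvail r = 0 := by unfold pvAvail; rw [if_neg h1]
    rw [ha]
    simp
  | succ N ih =>
    intro r j hr
    by_cases hc : 1 < r ∧ 2 ^ j * 2 ≤ s
    · obtain ⟨hr1, hs⟩ := hc
      have hcap : j + 1 ≤ pvCap s := by
        rw [← pvCap_iff]; rw [pow_succ]; exact hs
      have hav : 1 ≤ pvAvail r := (pvAvail_pos_iff r).1 hr1
      rw [pvInnerA, dif_pos ⟨hr1, hs⟩]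
      have hrec : (PySem.Int.floordiv r 2).toNat ≤ N := by
        rw [PySem.Int.floordiv_eq_ediv_of_pos (by norm_num)]; omega
      rw [show (2:Int) ^ j * 2 = 2 ^ (j + 1) by rw [pow_succ]]
      rw [ih (PySem.Int.floordiv r 2) (j + 1) hrec]
      rw [pvAvail_floordiv_two r hr1]
      have hE : min (pvAvail r - 1) (pvCap s - (j + 1)) = min (pvAvail r) (pvCap s - j) - 1 := by omega
      rw [hE]
      refine Prod.ext ?_ ?_
      · show 2 ^ (j + 1 + (min (pvAvail r) (pvCap s - j) - 1)) = 2 ^ (j + min (pvAvail r) (pvCap s - j))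
        congr 1; omega
      · show PySem.Int.floordiv (PySem.Int.floordiv r 2) (2 ^ (min (pvAvail r) (pvCap s - j) - 1))
            = PySem.Int.floordiv r (2 ^ min (pvAvail r) (pvCap s - j))
        rw [show PySem.Int.floordiv r 2 = PySem.Int.floordiv r (2 ^ 1) by rw [pow_one]]
        rw [pvFloordiv_pow_add]
        congr 2
        omega
    · rw [pvInnerA, dif_neg hc]
      have hE : min (pvAvail r) (pvCap s - j) = 0 := by
        rcases not_and_or.1 hc with h | h
        · have : pvAvail r = 0 := by unfold pvAvail; rw [if_neg h]
          omega
        · have : ¬ (j + 1 ≤ pvCap s) := by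
            rw [← pvCap_iff]; intro hh; exact h (by rw [pow_succ] at hh; exact hh)
          omega
      rw [hE]
      simp

theorem pvSpecExps_length (b : Nat) (l : List Int) : (pvSpecExps b l).length = l.length := by
  induction l generalizing b with
  | nil => rfl
  | cons s t ih => simp [pvSpecExps, ih]

theorem pvSpecExps_sum_le (b : Nat) (l : List Int) : (pvSpecExps b l).sum ≤ b := by
  induction l generalizing b with
  | nil => simp [pvSpecExps]
  | cons s t ih =>
    simp only [pvSpecExps, List.sum_cons]
    have := ih (b - min b (pvCap s))
    omega

theorem pvSpecExps_append (b : Nat) (l : List Int) (s : Int) :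
    pvSpecExps b (l ++ [s]) = pvSpecExps b l ++ [min (b - (pvSpecExps b l).sum) (pvCap s)] := by
  induction l generalizing b with
  | nil => simp [pvSpecExps]
  | cons x t ih =>
    simp only [List.cons_append, pvSpecExps, List.sum_cons, ih (b - min b (pvCap x))]
    have : b - min b (pvCap x) - (pvSpecExps (b - min b (pvCap x)) t).sum
        = b - (min b (pvCap x) + (pvSpecExps (b - min b (pvCap x)) t).sum) := by omega
    rw [this]

theorem pvFoldB (l : List Int) : ∀ (b : Nat) (acc : List Nat),
    l.foldl pvStepB (b, acc) = (b - (pvSpecExps b l).sum, acc ++ pvSpecExps b l) := by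
  induction l with
  | nil => intro b acc; simp [pvSpecExps]
  | cons s t ih =>
    intro b acc
    have hcap : (if 2 ≤ s then PySem.Int.bitLength s - 1 else 0) = pvCap s := by
      unfold pvCap; split
      · next h => exact pvBitLength_eq_log s (by omega)
      · rfl
    simp only [List.foldl_cons, pvStepB, hcap, ih]
    refine Prod.ext ?_ ?_
    · simp only [pvSpecExps, List.sum_cons]; omega
    · simp [pvSpecExps]


theorem pvOuterA_inv (bs : List Int) (aw : Int) :
    ∀ (d : Nat), d ≤ bs.length →
    (PySem.List.pyRange 0 (d : Int)).foldl (pvStepA bs) (List.replicate bs.length 1, aw)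
    = ((pvSpecExps (pvAvail aw) (bs.take d)).map (fun e => (2:Int) ^ e)
         ++ List.replicate (bs.length - d) 1,
       PySem.Int.floordiv aw (2 ^ (pvSpecExps (pvAvail aw) (bs.take d)).sum)) := by
  intro d
  induction d with
  | zero =>
    intro _
    simp [pvSpecExps]
  | succ d ih =>
    intro hd
    have hd' : d ≤ bs.length := by omega
    have hdlt : d < bs.length := by omega
    rw [show ((d + 1 : Nat) : Int) = (d : Int) + 1 by push_cast; ring]
    rw [PySem.List.pyRange_one_succ_right (by positivity), List.foldl_append, ih hd']
    have hlenpref : ((pvSpecExps (pvAvail aw) (bs.take d)).map (fun e => (2:Int) ^ e)).length = d := by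
      rw [List.length_map, pvSpecExps_length, List.length_take]
      omega
    have hK : (pvSpecExps (pvAvail aw) (bs.take d)).sum ≤ pvAvail aw := pvSpecExps_sum_le _ _
    set K := (pvSpecExps (pvAvail aw) (bs.take d)).sum with hKdef
    set prefL := (pvSpecExps (pvAvail aw) (bs.take d)).map (fun e => (2:Int) ^ e) with hpref
    simp only [List.foldl_cons, List.foldl_nil, pvStepA]
    have hget1 : PySem.List.pyGetD bs ((d : Nat) : Int) 0 = bs[d] := by
      rw [PySem.List.pyGetD_natCast]
      exact List.getD_eq_getElem bs 0 hdlt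
    have hget2 : PySem.List.pyGetD (prefL ++ List.replicate (bs.length - d) 1) ((d : Nat) : Int) 0 = 1 := by
      rw [PySem.List.pyGetD_natCast]
      rw [List.getD_eq_getElem _ 0 (by rw [List.length_append, hlenpref, List.length_replicate]; omega)]
      rw [List.getElem_append_right (by rw [hlenpref])]
      simp
    have hrem := pvAvail_floordiv_pow aw K hK
    have hinner := pvInnerA_char (bs[d]) (PySem.Int.floordiv aw (2 ^ K)).toNat
        (PySem.Int.floordiv aw (2 ^ K)) 0 le_rfl
    simp only [pow_zero, Nat.sub_zero, Nat.zero_add] at hinner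
    rw [hget1, hget2, hinner, hrem]
    have htake : List.take (d + 1) bs = List.take d bs ++ [bs[d]] := by
      rw [List.take_add_one, List.getElem?_eq_getElem hdlt]
      rfl
    rw [htake, pvSpecExps_append, ← hKdef]
    simp only [List.map_append, List.sum_append, List.map_cons, List.map_nil, List.sum_cons,
      List.sum_nil, Nat.add_zero]
    rw [PySem.List.pySetD_natCast, List.set_append, if_neg (by rw [hlenpref]; omega)]
    rw [hlenpref, Nat.sub_self]
    rw [show bs.length - d = (bs.length - (d + 1)) + 1 by omega, List.replicate_succ, List.set_cons_zero]
    rw [pvFloordiv_pow_add]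
    simp [List.append_assoc]
    exact ⟨hpref, by rw [← hKdef]⟩

theorem pvSet_replicate (n d : Nat) (_hd : d < n) (v : Int) :
    (List.replicate n (0:Int)).set d v = (List.range n).map (fun i => if i = d then v else 0) := by
  apply List.ext_getElem
  · simp
  · intro i h1 h2
    simp only [List.length_set, List.length_replicate] at h1
    rcases eq_or_ne i d with hid | hid
    · simp [hid]
    · simp [hid, (show d ≠ i from fun h => hid h.symm)]

theorem pvPadA_eq_fuel : ∀ (fuel nd nb : Nat) (bases : List (List Int)), nb - bases.length ≤ fuel →
    pvPadA nd nb bases = bases ++ List.replicate (nb - bases.length) (List.replicate nd 0) := by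
  intro fuel
  induction fuel with
  | zero =>
    intro nd nb bases h
    rw [pvPadA, if_neg (by omega), show nb - bases.length = 0 by omega]
    simp
  | succ fuel ih =>
    intro nd nb bases h
    rw [pvPadA]
    split
    · next hlt =>
      rw [ih nd nb _ (by rw [List.length_append]; simp; omega)]
      rw [List.append_assoc, List.length_append, List.length_singleton]
      rw [show nb - bases.length = (nb - (bases.length + 1)) + 1 by omega, List.replicate_succ]
      rfl
    · next hge =>
      rw [show nb - bases.length = 0 by omega]
      simp

theorem pvPadA_eq (nd nb : Nat) (bases : List (List Int)) :
    pvPadA nd nb bases = bases ++ List.replicate (nb - bases.length) (List.replicate nd 0) :=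
  pvPadA_eq_fuel (nb - bases.length) nd nb bases le_rfl

theorem pvWarps_pos (l : List Int) (hl : ∀ x ∈ l, 1 ≤ x) (lo : Int) (hne : 1 < lo → l ≠ []) :
    ∀ x ∈ (if 1 < lo then PySem.List.pySetD l (-1) (PySem.List.pyGetD l (-1) 0 * lo) else l), 1 ≤ x := by
  split
  · next hlo =>
    intro x hx
    unfold PySem.List.pySetD PySem.List.pySet? at hx
    cases hidx : PySem.List.pyIdx? l.length (-1) with
    | none => rw [hidx] at hx; simp at hx; exact hl x hx
    | some k =>
      rw [hidx] at hx
      simp only [Option.map_some, Option.getD_some] at hx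
      rcases List.mem_or_eq_of_mem_set hx with h | h
      · exact hl x h
      · subst h
        rw [PySem.List.pyGetD_neg_one l 0 (hne hlo)]
        have h1 : 1 ≤ l.getLast (hne hlo) := hl _ (List.getLast_mem _)
        calc (1:Int) = 1 * 1 := by ring
        _ ≤ l.getLast (hne hlo) * lo := mul_le_mul h1 (by omega) (by omega) (by omega)
  · intro x hx
    exact hl x hx

theorem pvWarps_length (l : List Int) (lo v : Int) :
    (if 1 < lo then PySem.List.pySetD l (-1) v else l).length = l.length := by
  split
  · exact PySem.List.length_pySetD l (-1) v
  · rfl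


-- ===== VERDICT (by name: the statement is the Claim_ definition above) =====
theorem compute_tdm_warp_bases_py_spec : Claim_equal_compute_tdm_warp_bases_py := by
  intro bs nw aw _hdom hpre
  obtain ⟨h1, h2, h3⟩ := hpre
  unfold Spec_compute_tdm_warp_bases_py compute_tdm_warp_bases_py compute_tdm_warp_bases_py_alt
  have hbudget : (if 1 < aw then PySem.Int.bitLength aw - 1 else 0) = pvAvail aw := by
    unfold pvAvail
    split
    · next h => exact pvBitLength_eq_log aw (by omega)
    · rfl
  have hnum : pvFloorLog2 nw = PySem.Int.bitLength nw - 1 := by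
    unfold pvFloorLog2
    exact (pvBitLength_eq_log nw h2).symm
  have houter := pvOuterA_inv bs aw bs.length le_rfl
  simp only [List.take_length, Nat.sub_self, List.replicate_zero, List.append_nil] at houter
  have hfoldB := pvFoldB bs (pvAvail aw) []
  simp only [hbudget, hnum, houter, hfoldB, pvPadA_eq, List.nil_append]
  set S := (pvSpecExps (pvAvail aw) bs).sum with hS
  set wpd0 := List.map (fun e => (2:Int) ^ e) (pvSpecExps (pvAvail aw) bs) with hwpd0
  set lo := PySem.Int.floordiv aw (2 ^ S) with hlo
  set warps := if 1 < lo then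
      PySem.List.pySetD wpd0 (-1) (PySem.List.pyGetD wpd0 (-1) 0 * lo)
    else wpd0 with hwarps
  have hwlen : warps.length = bs.length := by
    rw [hwarps, pvWarps_length, hwpd0, List.length_map, pvSpecExps_length]
  have hwpos : ∀ x ∈ warps, 1 ≤ x := by
    rw [hwarps]
    apply pvWarps_pos
    · intro x hx
      rw [hwpd0] at hx
      obtain ⟨e, _, rfl⟩ := List.mem_map.1 hx
      exact one_le_pow₀ (by norm_num)
    · intro hl
      have haw : 2 * 2 ^ S ≤ aw := by
        rw [← PySem.Int.le_floordiv_iff_mul_le (by positivity), ← hlo]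
        omega
      have hpow : (1:Int) ≤ 2 ^ S := one_le_pow₀ (by norm_num)
      have hbs : bs ≠ [] := by
        intro hnil
        have := h3 hnil
        omega
      rw [hwpd0]
      simp only [ne_eq, List.map_eq_nil_iff]
      intro hnil
      exact hbs (by have := pvSpecExps_length (pvAvail aw) bs; rw [hnil] at this; simpa using (List.length_eq_zero_iff.1 this.symm))
  have hbases :
      List.foldl (fun bases d =>
          List.foldl (fun acc k => acc ++
              [PySem.List.pySetD (List.replicate bs.length 0) d
                  (PySem.Int.floordiv (PySem.List.pyGetD bs d 0) (PySem.List.pyGetD warps d 0) * 2 ^ k.toNat)])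
            bases
            (PySem.List.pyRange 0 (pvFloorLog2 (PySem.List.pyGetD warps d 0) : Int)))
        [] (PySem.List.pyRange 0 (bs.length : Int))
      = (List.range bs.length).flatMap (fun (d : Nat) =>
          (List.range (PySem.Int.bitLength (PySem.List.pyGetD warps (d : Int) 0) - 1)).map (fun k =>
            (List.range bs.length).map (fun i =>
              if i = d then
                PySem.Int.floordiv (PySem.List.pyGetD bs (d : Int) 0) (PySem.List.pyGetD warps (d : Int) 0) * 2 ^ k
              else 0))) := by
    simp only [PySem.List.foldl_append_singleton_eq_map, PySem.List.foldl_append_eq_flatMap,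
      List.nil_append]
    rw [PySem.List.pyRange_zero_nat bs.length, List.flatMap_map]
    apply List.flatMap_congr
    intro d hd
    have hdn : d < bs.length := List.mem_range.1 hd
    have hgw : 1 ≤ PySem.List.pyGetD warps (d : Int) 0 := by
      rw [PySem.List.pyGetD_natCast, List.getD_eq_getElem _ 0 (hwlen ▸ hdn)]
      exact hwpos _ (List.getElem_mem _)
    rw [show pvFloorLog2 (PySem.List.pyGetD warps (d : Int) 0)
          = PySem.Int.bitLength (PySem.List.pyGetD warps (d : Int) 0) - 1 by
        unfold pvFloorLog2; exact (pvBitLength_eq_log _ hgw).symm]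
    rw [PySem.List.pyRange_zero_nat, List.map_map]
    refine List.map_congr_left ?_
    intro k _
    simp only [Function.comp, Int.toNat_natCast, PySem.List.pySetD_natCast]
    exact pvSet_replicate bs.length d hdn _
  rw [hbases]
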